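-- pv_equiv track=rewrite | github.com/jyc0011/backjoon | 프로그래머스/1/42840. 모의고사/모의고사.py | solution
-- ===== SOURCE A (Python) =====
-- def solution(answers):
--     check = [
--         [1, 2, 3, 4, 5],
--         [2, 1, 2, 3, 2, 4, 2, 5],
--         [3, 3, 1, 1, 2, 2, 4, 4, 5, 5]
--     ]
--     score = [0, 0, 0]
--
--     for i in range(len(answers)):
--         for j in range(3):
--             if answers[i] == check[j][i % len(check[j])]:
--                 score[j] += 1
--
--     max_score = max(score)
--     answer = [i + 1 for i in range(3) if score[i] == max_score]
--
--     return answer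
-- ===== SOURCE B (Python) =====
-- def solution(answers):
--     patterns = [
--         [1, 2, 3, 4, 5],
--         [2, 1, 2, 3, 2, 4, 2, 5],
--         [3, 3, 1, 1, 2, 2, 4, 4, 5, 5],
--     ]
--     # Counting table: cnt[r*5 + v-1] = how many answers equal v at positions i with i % 40 == r
--     # (40 = lcm of the pattern lengths; answers outside 1..5 can never match and are skipped).
--     cnt = [0] * 200
--     for i, a in enumerate(answers):
--         if 1 <= a <= 5:
--             cnt[(i % 40) * 5 + (a - 1)] += 1
--     scores = [sum(cnt[r * 5 + p[r % len(p)] - 1] for r in range(40)) for p in patterns]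
--     best = max(scores)
--     return [i for i, s in enumerate(scores, 1) if s == best]
-- ===== Notes on version B (the rewrite author's own statement) =====
-- stated objective: faster
-- what changed: B never compares answers against the patterns element-by-element: it builds a 40x5 counting table keyed by (position mod 40, value) in one pass over answers, then obtains each pattern's score as a sum of 40 table lookups (40 = lcm of the pattern lengths); A instead runs an interleaved loop comparing every answer with all three patterns via i % len indexing.
import Mathlib
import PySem

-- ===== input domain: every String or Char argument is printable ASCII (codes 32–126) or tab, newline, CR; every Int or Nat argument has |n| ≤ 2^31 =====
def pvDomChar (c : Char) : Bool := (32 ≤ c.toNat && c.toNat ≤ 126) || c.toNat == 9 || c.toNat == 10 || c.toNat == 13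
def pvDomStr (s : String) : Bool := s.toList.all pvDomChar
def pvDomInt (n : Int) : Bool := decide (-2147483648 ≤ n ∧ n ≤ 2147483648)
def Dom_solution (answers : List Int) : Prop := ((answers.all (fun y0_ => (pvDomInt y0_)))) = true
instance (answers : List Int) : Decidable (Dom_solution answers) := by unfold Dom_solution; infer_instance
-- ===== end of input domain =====

-- B replaces A's element-vs-pattern comparisons by a 40×5 counting table keyed by (position mod 40, value); scores are then 40 table lookups per pattern. Same values.

-- ===== PORT A =====
def solution (answers : List Int) : List Int :=
  let check : List (List Int) :=
    [[1, 2, 3, 4, 5],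
     [2, 1, 2, 3, 2, 4, 2, 5],
     [3, 3, 1, 1, 2, 2, 4, 4, 5, 5]]
  let score : List Int :=
    (PySem.List.pyRange 0 (PySem.List.len answers) 1).foldl (fun score i =>
      (PySem.List.pyRange 0 3 1).foldl (fun score j =>
        let cj := PySem.List.pyGetD check j []
        if PySem.List.pyGetD answers i 0 =
           PySem.List.pyGetD cj (PySem.Int.mod i (PySem.List.len cj)) 0 then
          PySem.List.pySetD score j (PySem.List.pyGetD score j 0 + 1)
        else score) score) [0, 0, 0]
  let max_score := (PySem.List.max? score (fun x => x)).getD 0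
  ((PySem.List.pyRange 0 3 1).filter
      (fun i => PySem.List.pyGetD score i 0 = max_score)).map (fun i => i + 1)

-- ===== PORT B =====
-- one step of B's table-building loop: bump cnt[(i % 40) * 5 + (a - 1)] for 1 ≤ a ≤ 5
def stepC (cnt : List Int) (pr : Int × Int) : List Int :=
  if 1 ≤ pr.2 ∧ pr.2 ≤ 5 then
    PySem.List.pySetD cnt (PySem.Int.mod pr.1 40 * 5 + (pr.2 - 1))
      (PySem.List.pyGetD cnt (PySem.Int.mod pr.1 40 * 5 + (pr.2 - 1)) 0 + 1)
  else cnt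

-- sum(cnt[r * 5 + p[r % len(p)] - 1] for r in range(40))
def scoreAlt (cnt : List Int) (p : List Int) : Int :=
  ((PySem.List.pyRange 0 40 1).map (fun r =>
     PySem.List.pyGetD cnt
       (r * 5 + PySem.List.pyGetD p (PySem.Int.mod r (PySem.List.len p)) 0 - 1) 0)).sum

def solution_alt (answers : List Int) : List Int :=
  let patterns : List (List Int) :=
    [[1, 2, 3, 4, 5],
     [2, 1, 2, 3, 2, 4, 2, 5],
     [3, 3, 1, 1, 2, 2, 4, 4, 5, 5]]
  let cnt := (PySem.List.enumerate answers 0).foldl stepC (List.replicate 200 (0:Int))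
  let scores := patterns.map (fun p => scoreAlt cnt p)
  let best := (PySem.List.max? scores (fun x => x)).getD 0
  ((PySem.List.enumerate scores 1).filter (fun pr => pr.2 = best)).map (fun pr => pr.1)

-- ===== PRECONDITION & SPEC =====
def Spec_solution (answers : List Int) (out : List Int) : Prop := out = solution_alt answers
instance (answers : List Int) (out : List Int) : Decidable (Spec_solution answers out) := by unfold Spec_solution; infer_instance

-- ===== CLAIM (what is proved, stated in full; the proofs are below) =====
def Claim_equal_solution : Prop := ∀ (answers : List Int), Dom_solution answers → Spec_solution answers (solution answers)

-- ===== LEMMAS AND PROOFS =====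

-- A's per-pattern accumulator step on an enumerated pair
def gA (p : List Int) (s : Int) (pr : Int × Int) : Int :=
  if pr.2 = PySem.List.pyGetD p (PySem.Int.mod pr.1 (PySem.List.len p)) 0 then s + 1 else s

-- the Nat-side index of B's table cell consulted for pattern p at residue r
def idxN (p : List Int) (r : Nat) : Nat := r * 5 + (p.getD (r % p.length) 0).toNat - 1
def idxsN (p : List Int) : List Nat := (List.range 40).map (idxN p)

-- one outer-loop step of A on a score list of shape [a, b, c]
theorem Linner (pr : Int × Int) (a b c : Int) :
    (PySem.List.pyRange 0 3 1).foldl (fun score j =>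
      let cj := PySem.List.pyGetD
        [[1, 2, 3, 4, 5], [2, 1, 2, 3, 2, 4, 2, 5], [3, 3, 1, 1, 2, 2, 4, 4, 5, 5]] j []
      if pr.2 = PySem.List.pyGetD cj (PySem.Int.mod pr.1 (PySem.List.len cj)) 0 then
        PySem.List.pySetD score j (PySem.List.pyGetD score j 0 + 1)
      else score) [a, b, c]
  = [gA [1,2,3,4,5] a pr, gA [2,1,2,3,2,4,2,5] b pr, gA [3,3,1,1,2,2,4,4,5,5] c pr] := by
  rw [show PySem.List.pyRange 0 3 1 = ([0, 1, 2] : List Int) from by decide]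
  simp only [List.foldl_cons, List.foldl_nil]
  rw [show PySem.List.pyGetD
        ([[1, 2, 3, 4, 5], [2, 1, 2, 3, 2, 4, 2, 5], [3, 3, 1, 1, 2, 2, 4, 4, 5, 5]] : List (List Int)) 0 []
        = [1,2,3,4,5] from by decide,
      show PySem.List.pyGetD
        ([[1, 2, 3, 4, 5], [2, 1, 2, 3, 2, 4, 2, 5], [3, 3, 1, 1, 2, 2, 4, 4, 5, 5]] : List (List Int)) 1 []
        = [2,1,2,3,2,4,2,5] from by decide,
      show PySem.List.pyGetD
        ([[1, 2, 3, 4, 5], [2, 1, 2, 3, 2, 4, 2, 5], [3, 3, 1, 1, 2, 2, 4, 4, 5, 5]] : List (List Int)) 2 []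
        = [3,3,1,1,2,2,4,4,5,5] from by decide]
  simp only [gA]
  split_ifs <;>
    simp_all [PySem.List.pySetD_of_nonneg, PySem.List.pyGetD_ofNat']

-- A's whole interleaved loop splits into the three per-pattern folds
theorem L2 :
    ∀ (l : List (Int × Int)) (a b c : Int),
      l.foldl (fun score (pr : Int × Int) =>
        (PySem.List.pyRange 0 3 1).foldl (fun score j =>
          let cj := PySem.List.pyGetD
            [[1, 2, 3, 4, 5], [2, 1, 2, 3, 2, 4, 2, 5], [3, 3, 1, 1, 2, 2, 4, 4, 5, 5]] j []
          if pr.2 = PySem.List.pyGetD cj (PySem.Int.mod pr.1 (PySem.List.len cj)) 0 then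
            PySem.List.pySetD score j (PySem.List.pyGetD score j 0 + 1)
          else score) score) [a, b, c]
      = [l.foldl (gA [1,2,3,4,5]) a,
         l.foldl (gA [2,1,2,3,2,4,2,5]) b,
         l.foldl (gA [3,3,1,1,2,2,4,4,5,5]) c] := by
  intro l
  induction l with
  | nil => intro a b c; simp
  | cons pr t ih =>
    intro a b c
    simp only [List.foldl_cons]
    rw [Linner pr a b c, ih]

-- getD after a single set, the form the table-update proof uses
theorem getD_set_eq (cnt : List Int) (k j : Nat) (v : Int) (hk : k < cnt.length) :
    (cnt.set k v).getD j 0 = if j = k then v else cnt.getD j 0 := by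
  simp only [List.getD_eq_getElem?_getD, List.getElem?_set]
  by_cases h : j = k
  · subst h; simp [hk]
  · rw [if_neg (fun hc => h hc.symm), if_neg h]

-- bumping one cell shifts a sum of lookups by the number of times that cell is consulted
theorem sum_getD_set (cnt : List Int) (k : Nat) (v : Int) (hk : k < cnt.length) :
    ∀ (idxs : List Nat),
      (idxs.map (fun j => (cnt.set k v).getD j 0)).sum
        = (idxs.map (fun j => cnt.getD j 0)).sum + (idxs.count k : Int) * (v - cnt.getD k 0) := by
  intro idxs
  induction idxs with
  | nil => simp
  | cons j t ih =>
    simp only [List.map_cons, List.sum_cons, ih, List.count_cons, getD_set_eq cnt k j v hk]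
    by_cases h : j = k
    · subst h; simp; ring
    · simp only [h, if_false, beq_iff_eq]
      push_cast; ring

-- scoreAlt rendered on the Nat side
theorem scoreAlt_eq (cnt p : List Int) (hp : 0 < p.length)
    (h1 : ∀ v ∈ p, 1 ≤ v) :
    scoreAlt cnt p = ((idxsN p).map (fun j => cnt.getD j 0)).sum := by
  unfold scoreAlt idxsN
  rw [show PySem.List.pyRange 0 40 1 = (List.range 40).map Int.ofNat from by decide]
  rw [List.map_map, List.map_map]
  congr 1
  apply List.map_congr_left
  intro r _
  simp only [Function.comp, Int.ofNat_eq_natCast]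
  have hmem : p.getD (r % p.length) 0 ∈ p := by
    rw [List.getD_eq_getElem?_getD, List.getElem?_eq_getElem (Nat.mod_lt _ hp)]
    exact List.getElem_mem _
  have hv := h1 _ hmem
  have hmod : PySem.Int.mod (r : Int) (PySem.List.len p) = ((r % p.length : Nat) : Int) := by
    rw [PySem.List.len_eq]
    exact_mod_cast PySem.Int.mod_natCast r p.length
  rw [hmod, PySem.List.pyGetD_natCast]
  have hcast : ((r : Int) * 5 + p.getD (r % p.length) 0 - 1) = ((idxN p r : Nat) : Int) := by
    unfold idxN; omega
  rw [hcast, PySem.List.pyGetD_natCast]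

-- the main invariant: running B's table loop adds exactly A's match count to each pattern's score
theorem mainInv (p : List Int) (hp : 0 < p.length) (hdvd : p.length ∣ 40)
    (h15 : ∀ v ∈ p, 1 ≤ v ∧ v ≤ 5)
    (hcount : ∀ r0 < 40, ∀ b < 5,
      (idxsN p).count (r0 * 5 + b) = if b + 1 = (p.getD (r0 % p.length) 0).toNat then 1 else 0) :
    ∀ (l : List Int) (i0 : Nat) (cnt : List Int), cnt.length = 200 →
      scoreAlt ((PySem.List.enumerate l (i0 : Int)).foldl stepC cnt) p
        = scoreAlt cnt p
          + ((PySem.List.enumerate l (i0 : Int)).countP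
              (fun pr => decide (pr.2 = PySem.List.pyGetD p (PySem.Int.mod pr.1 (PySem.List.len p)) 0)) : Int) := by
  intro l
  induction l with
  | nil => intro i0 cnt hlen; simp [PySem.List.enumerate_nil]
  | cons a t ih =>
    intro i0 cnt hlen
    rw [PySem.List.enumerate_cons]
    simp only [List.foldl_cons, List.countP_cons]
    have h1 : ∀ v ∈ p, 1 ≤ v := fun v hv => (h15 v hv).1
    have hvmem : p.getD (i0 % p.length) 0 ∈ p := by
      rw [List.getD_eq_getElem?_getD, List.getElem?_eq_getElem (Nat.mod_lt _ hp)]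
      exact List.getElem_mem _
    have hv15 := h15 _ hvmem
    have hmodp : PySem.Int.mod (i0 : Int) (PySem.List.len p) = ((i0 % p.length : Nat) : Int) := by
      rw [PySem.List.len_eq]; exact_mod_cast PySem.Int.mod_natCast i0 p.length
    have hgetp : PySem.List.pyGetD p (PySem.Int.mod (i0 : Int) (PySem.List.len p)) 0
        = p.getD (i0 % p.length) 0 := by rw [hmodp, PySem.List.pyGetD_natCast]
    by_cases ha : 1 ≤ a ∧ a ≤ 5
    · -- table cell (i0 % 40) * 5 + (a - 1) is bumped
      have hmod40 : PySem.Int.mod (i0 : Int) 40 = ((i0 % 40 : Nat) : Int) := by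
        exact_mod_cast PySem.Int.mod_natCast i0 40
      set kn : Nat := (i0 % 40) * 5 + (a - 1).toNat with hkn
      have hkcast : PySem.Int.mod (i0 : Int) 40 * 5 + (a - 1) = ((kn : Nat) : Int) := by
        rw [hmod40]; omega
      have hkn200 : kn < 200 := by
        have : i0 % 40 < 40 := Nat.mod_lt _ (by norm_num)
        omega
      have hstep : stepC cnt ((i0 : Int), a)
          = cnt.set kn (cnt.getD kn 0 + 1) := by
        unfold stepC
        rw [if_pos ha]
        simp only [hkcast, PySem.List.pySetD_natCast, PySem.List.pyGetD_natCast]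
      rw [hstep, show ((i0 : Int) + 1) = ((i0 + 1 : Nat) : Int) from by push_cast; ring,
          ih (i0 + 1) _ (by rw [List.length_set]; exact hlen)]
      rw [scoreAlt_eq _ p hp h1, scoreAlt_eq cnt p hp h1,
          sum_getD_set cnt kn (cnt.getD kn 0 + 1) (by omega) (idxsN p)]
      rw [hcount (i0 % 40) (Nat.mod_lt _ (by norm_num)) ((a - 1).toNat) (by omega)]
      have hmodmod : (i0 % 40) % p.length = i0 % p.length := Nat.mod_mod_of_dvd i0 hdvd
      rw [hgetp, hmodmod]
      by_cases hmatch : a = p.getD (i0 % p.length) 0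
      · rw [if_pos (show (a - 1).toNat + 1 = (p.getD (i0 % p.length) 0).toNat by omega),
            if_pos (decide_eq_true hmatch)]
        push_cast; ring
      · rw [if_neg (show ¬ ((a - 1).toNat + 1 = (p.getD (i0 % p.length) 0).toNat) by omega),
            if_neg (show ¬ (decide (a = p.getD (i0 % p.length) 0) = true) by simp only [decide_eq_true_eq]; exact hmatch)]
        push_cast; ring
    · -- a cannot equal any pattern value (all pattern values lie in 1..5)
      have hstep : stepC cnt ((i0 : Int), a) = cnt := by unfold stepC; rw [if_neg ha]
      have hne : ¬ (a = p.getD (i0 % p.length) 0) := by omega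
      rw [hstep, show ((i0 : Int) + 1) = ((i0 + 1 : Nat) : Int) from by push_cast; ring,
          ih (i0 + 1) _ hlen]
      rw [hgetp, if_neg (show ¬ (decide (a = p.getD (i0 % p.length) 0) = true) by simp only [decide_eq_true_eq]; exact hne)]
      push_cast; ring

-- the empty table scores zero
theorem scoreAlt_replicate (p : List Int) (hp : 0 < p.length) (h1 : ∀ v ∈ p, 1 ≤ v) :
    scoreAlt (List.replicate 200 (0:Int)) p = 0 := by
  rw [scoreAlt_eq _ p hp h1]
  have hz : ∀ j : Nat, (List.replicate 200 (0:Int)).getD j 0 = 0 := by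
    intro j
    rw [List.getD_eq_getElem?_getD, List.getElem?_replicate]
    by_cases h : j < 200
    · rw [if_pos h]; rfl
    · rw [if_neg h]; rfl
  suffices h : ∀ idxs : List Nat,
      ((idxs.map (fun j => (List.replicate 200 (0:Int)).getD j 0)).sum = 0) from h _
  intro idxs
  induction idxs with
  | nil => rfl
  | cons j t ih => rw [List.map_cons, List.sum_cons, hz j, ih]; rfl

-- the common tail: pick the winners out of a 3-list of scores, both renderings
theorem Lfin (x y z M : Int) :
    ((PySem.List.pyRange 0 3 1).filter
        (fun i => PySem.List.pyGetD [x, y, z] i 0 = M)).map (fun i => i + 1)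
      = ((PySem.List.enumerate [x, y, z] 1).filter (fun pr => pr.2 = M)).map (fun pr => pr.1) := by
  rw [show PySem.List.pyRange 0 3 1 = ([0, 1, 2] : List Int) from by decide,
      show PySem.List.enumerate [x, y, z] 1 = [(1, x), (2, y), (3, z)] from by
        simp [PySem.List.enumerate_cons, PySem.List.enumerate_nil]]
  by_cases hx : x = M <;> by_cases hy : y = M <;> by_cases hz : z = M <;>
    simp [List.filter, PySem.List.pyGetD_ofNat', hx, hy, hz]

-- per pattern: A's fold equals B's table score
theorem perPattern (p : List Int) (hp : 0 < p.length) (hdvd : p.length ∣ 40)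
    (h15 : ∀ v ∈ p, 1 ≤ v ∧ v ≤ 5)
    (hcount : ∀ r0 < 40, ∀ b < 5,
      (idxsN p).count (r0 * 5 + b) = if b + 1 = (p.getD (r0 % p.length) 0).toNat then 1 else 0)
    (answers : List Int) :
    (PySem.List.enumerate answers 0).foldl (gA p) 0
      = scoreAlt ((PySem.List.enumerate answers 0).foldl stepC (List.replicate 200 (0:Int))) p := by
  have h1 : ∀ v ∈ p, 1 ≤ v := fun v hv => (h15 v hv).1
  have hm := mainInv p hp hdvd h15 hcount answers 0 (List.replicate 200 0) List.length_replicate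
  simp only [Nat.cast_zero] at hm
  rw [hm, scoreAlt_replicate p hp h1, zero_add]
  have := PySem.List.foldl_ite_add_one
    (l := PySem.List.enumerate answers 0)
    (p := fun pr : Int × Int => pr.2 = PySem.List.pyGetD p (PySem.Int.mod pr.1 (PySem.List.len p)) 0)
    (a := (0 : Int))
  simpa [gA] using this

-- ===== VERDICT (by name: the statement is the Claim_ definition above) =====
theorem solution_spec : Claim_equal_solution := by
  intro answers _
  unfold Spec_solution solution solution_alt
  simp only []
  have henum := PySem.List.enumerate_eq_map_pyRange answers 0
  have hA :
      (PySem.List.pyRange 0 (PySem.List.len answers) 1).foldl (fun score i =>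
        (PySem.List.pyRange 0 3 1).foldl (fun score j =>
          let cj := PySem.List.pyGetD
            [[1, 2, 3, 4, 5], [2, 1, 2, 3, 2, 4, 2, 5], [3, 3, 1, 1, 2, 2, 4, 4, 5, 5]] j []
          if PySem.List.pyGetD answers i 0 =
             PySem.List.pyGetD cj (PySem.Int.mod i (PySem.List.len cj)) 0 then
            PySem.List.pySetD score j (PySem.List.pyGetD score j 0 + 1)
          else score) score) ([0, 0, 0] : List Int)
      = [(PySem.List.enumerate answers 0).foldl (gA [1,2,3,4,5]) 0,
         (PySem.List.enumerate answers 0).foldl (gA [2,1,2,3,2,4,2,5]) 0,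
         (PySem.List.enumerate answers 0).foldl (gA [3,3,1,1,2,2,4,4,5,5]) 0] := by
    calc _ = (PySem.List.enumerate answers 0).foldl (fun score (pr : Int × Int) =>
        (PySem.List.pyRange 0 3 1).foldl (fun score j =>
          let cj := PySem.List.pyGetD
            [[1, 2, 3, 4, 5], [2, 1, 2, 3, 2, 4, 2, 5], [3, 3, 1, 1, 2, 2, 4, 4, 5, 5]] j []
          if pr.2 = PySem.List.pyGetD cj (PySem.Int.mod pr.1 (PySem.List.len cj)) 0 then
            PySem.List.pySetD score j (PySem.List.pyGetD score j 0 + 1)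
          else score) score) ([0, 0, 0] : List Int) := by
          rw [henum, List.foldl_map]
      _ = _ := L2 _ 0 0 0
  rw [hA]
  rw [perPattern [1,2,3,4,5] (by decide) (by decide) (by decide) (by decide) answers,
      perPattern [2,1,2,3,2,4,2,5] (by decide) (by decide) (by decide) (by decide) answers,
      perPattern [3,3,1,1,2,2,4,4,5,5] (by decide) (by decide) (by decide) (by decide) answers]
  simp only [List.map_cons, List.map_nil]
  rw [Lfin]
  rfl
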